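-- pv_equiv track=rewrite | github.com/LinyiHan1998/LCPractice | OA/amazon/getScoreDifference.py | getScoreDifference
-- ===== SOURCE A (Python) =====
-- def getScoreDifference(points):
--     points = sorted(points)
--     res1,res2 = 0,0
--     n = len(points)
--     for i in range(n):
--         if i % 2 != 0:
--             res2 += points.pop()
--         else:
--             res1 += points.pop()
--     return abs(res1 - res2)
-- ===== SOURCE B (Python) =====
-- def getScoreDifference(points):
--     total = 0
--     for x in sorted(points):
--         total = x - total
--     return abs(total)
-- ===== Notes on version B (the rewrite author's own statement) =====
-- stated objective: simpler
-- what changed: Replaces the parity-branched pop loop with two accumulators by a single fold total = x - total over the ascending sorted list (the alternating sum), returning its absolute value.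
import Mathlib
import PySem

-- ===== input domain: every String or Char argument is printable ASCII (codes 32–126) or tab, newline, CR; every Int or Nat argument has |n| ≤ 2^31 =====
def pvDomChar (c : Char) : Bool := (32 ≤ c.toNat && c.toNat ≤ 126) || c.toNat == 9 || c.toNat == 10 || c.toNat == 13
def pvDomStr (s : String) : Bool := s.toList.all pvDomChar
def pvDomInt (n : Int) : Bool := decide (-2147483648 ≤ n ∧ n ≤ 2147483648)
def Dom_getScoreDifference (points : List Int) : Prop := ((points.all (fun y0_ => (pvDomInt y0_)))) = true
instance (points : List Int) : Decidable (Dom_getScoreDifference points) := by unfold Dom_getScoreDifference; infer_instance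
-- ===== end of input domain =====

-- B replaces A's parity-branched pop loop (two accumulators) by a single fold
-- total = x - total over the ascending sorted list; same return value, simpler.

-- ===== PORT A =====
-- A: sort ascending, then for i in range(n) pop the last element into res1 (even i)
-- or res2 (odd i); return abs(res1 - res2).  pop on an empty list cannot occur
-- (the loop pops exactly length-many times); the 'none' branch keeps the state.
def getScoreDifference (points : List Int) : Int :=
  let pts := PySem.List.sorted points (fun x => x)
  let n : Int := pts.length
  let st := (PySem.List.pyRange 0 n 1).foldl
    (fun (st : Int × Int × List Int) i =>
      match PySem.List.pop? st.2.2 with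
      | some (v, rest) =>
        if PySem.Int.mod i 2 ≠ 0 then (st.1, st.2.1 + v, rest)
        else (st.1 + v, st.2.1, rest)
      | none => st)
    ((0 : Int), (0 : Int), pts)
  |st.1 - st.2.1|

-- ===== PORT B =====
def getScoreDifference_alt (points : List Int) : Int :=
  |(PySem.List.sorted points (fun x => x)).foldl (fun acc x => x - acc) 0|

-- ===== PRECONDITION & SPEC =====
def Spec_getScoreDifference (points : List Int) (out : Int) : Prop := out = getScoreDifference_alt points
instance (points : List Int) (out : Int) : Decidable (Spec_getScoreDifference points out) := by unfold Spec_getScoreDifference; infer_instance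

-- ===== CLAIM (what is proved, stated in full; the proofs are below) =====
def Claim_equal_getScoreDifference : Prop := ∀ (points : List Int), Dom_getScoreDifference points → Spec_getScoreDifference points (getScoreDifference points)

-- ===== LEMMAS AND PROOFS =====

-- Abbreviations for the two loop bodies (proof-only).
def pvStepA (st : Int × Int × List Int) (i : Int) : Int × Int × List Int :=
  match PySem.List.pop? st.2.2 with
  | some (v, rest) =>
    if PySem.Int.mod i 2 ≠ 0 then (st.1, st.2.1 + v, rest)
    else (st.1 + v, st.2.1, rest)
  | none => st

def pvF (l : List Int) : Int := l.foldl (fun acc x => x - acc) 0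

theorem pvF_append (l : List Int) (x : Int) : pvF (l ++ [x]) = x - pvF l := by
  simp [pvF, List.foldl_append]

-- Invariant of A's loop: starting at index a ≥ 0 with list l, the final
-- difference res1 - res2 changes by ±(alternating sum of l from the top),
-- the sign depending on the parity of a.
theorem pvLoopA (l : List Int) : ∀ (a r1 r2 : Int), 0 ≤ a →
    (let st := (PySem.List.pyRange a (a + l.length) 1).foldl pvStepA (r1, r2, l)
     st.1 - st.2.1 = (r1 - r2) + (if a % 2 = 0 then 1 else -1) * pvF l) := by
  induction l using List.reverseRecOn with
  | nil =>
    intro a r1 r2 _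
    simp [pvF]
  | append_singleton l₀ x ih =>
    intro a r1 r2 ha
    have hlen : (l₀ ++ [x]).length = l₀.length + 1 := by simp
    have hab : a < a + ((l₀ ++ [x]).length : Int) := by
      have : (0 : Int) < ((l₀ ++ [x]).length : Int) := by
        simp
      omega
    rw [PySem.List.pyRange_one_cons hab]
    simp only [List.foldl_cons]
    have hstep : pvStepA (r1, r2, l₀ ++ [x]) a =
        if PySem.Int.mod a 2 ≠ 0 then (r1, r2 + x, l₀) else (r1 + x, r2, l₀) := by
      simp [pvStepA, PySem.List.pop?_last]
    have hmod : PySem.Int.mod a 2 = a % 2 := by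
      simp [PySem.Int.mod, Int.fmod_eq_emod]
    have hend : a + ((l₀ ++ [x]).length : Int) = (a + 1) + (l₀.length : Int) := by
      simp; omega
    rw [hstep, hmod, hend]
    have ih1 := ih (a + 1) r1 (r2 + x) (by omega)
    have ih2 := ih (a + 1) (r1 + x) r2 (by omega)
    by_cases hpar : a % 2 = 0
    · have hpar1 : (a + 1) % 2 ≠ 0 := by omega
      rw [if_neg (show ¬(a % 2 ≠ 0) by omega)]
      simp only [ih2, if_neg hpar1, if_pos hpar, pvF_append]
      ring
    · have hpar1 : (a + 1) % 2 = 0 := by omega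
      rw [if_pos (show a % 2 ≠ 0 from hpar)]
      simp only [ih1, if_pos hpar1, if_neg hpar, pvF_append]
      ring

-- ===== VERDICT (by name: the statement is the Claim_ definition above) =====
theorem getScoreDifference_spec : Claim_equal_getScoreDifference := by
  intro points _
  unfold Spec_getScoreDifference getScoreDifference getScoreDifference_alt
  have h := pvLoopA (PySem.List.sorted points (fun x => x)) 0 0 0 le_rfl
  simp only [zero_add] at h
  simp only [show ∀ st i, (fun (st : Int × Int × List Int) (i : Int) =>
      match PySem.List.pop? st.2.2 with
      | some (v, rest) =>
        if PySem.Int.mod i 2 ≠ 0 then (st.1, st.2.1 + v, rest)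
        else (st.1 + v, st.2.1, rest)
      | none => st) st i = pvStepA st i from fun _ _ => rfl]
  rw [h]
  norm_num [pvF]
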